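-- pv_equiv track=rewrite | github.com/ufbx/ufbx | misc/zlib_debug_compressor.py | make_int_coding
-- ===== SOURCE A (Python) =====
-- from collections import namedtuple, defaultdict
--
-- IntCoding = namedtuple("IntCoding", "symbol base bits")
--
-- def make_int_coding(first_symbol, first_value, bit_sizes):
--     symbol = first_symbol
--     value = first_value
--     codings = []
--     for bits in bit_sizes:
--         codings.append(IntCoding(symbol, value, bits))
--         value += 1 << bits
--         symbol += 1
--     return codings
-- ===== SOURCE B (Python) =====
-- from collections import namedtuple
--
-- IntCoding = namedtuple("IntCoding", "symbol base bits")
--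
-- def make_int_coding(first_symbol, first_value, bit_sizes):
--     # Stateless closed form: each coding is computed independently from its index,
--     # with the base recomputed as a fresh prefix sum -- no running accumulators.
--     bits = list(bit_sizes)
--     return [IntCoding(first_symbol + i,
--                       first_value + sum(1 << b for b in bits[:i]),
--                       bits[i])
--             for i in range(len(bits))]
-- ===== Notes on version B (the rewrite author's own statement) =====
-- stated objective: alternative
-- what changed: Replaces the accumulator loop by a stateless per-index closed form: each tuple is computed independently as (first_symbol+i, first_value + prefix sum of 1<<b over the first i bit sizes recomputed from scratch, bits[i]), with no running symbol/value state.
import Mathlib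
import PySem

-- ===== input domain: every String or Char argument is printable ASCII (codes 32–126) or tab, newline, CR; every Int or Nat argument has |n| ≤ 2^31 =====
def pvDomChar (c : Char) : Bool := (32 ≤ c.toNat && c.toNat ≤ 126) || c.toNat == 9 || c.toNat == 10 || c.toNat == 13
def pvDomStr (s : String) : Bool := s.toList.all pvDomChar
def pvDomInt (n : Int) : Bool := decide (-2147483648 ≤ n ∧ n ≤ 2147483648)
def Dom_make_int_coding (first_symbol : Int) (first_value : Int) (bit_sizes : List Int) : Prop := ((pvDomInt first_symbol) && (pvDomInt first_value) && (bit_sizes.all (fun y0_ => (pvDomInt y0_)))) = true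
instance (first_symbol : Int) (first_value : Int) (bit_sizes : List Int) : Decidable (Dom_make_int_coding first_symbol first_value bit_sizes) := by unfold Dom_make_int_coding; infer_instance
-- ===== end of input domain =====

-- B replaces the accumulator loop by a stateless per-index closed form (symbol =
-- first_symbol+i, base = first_value + prefix sum of shifts recomputed per index);
-- alternative decomposition, O(n^2) instead of O(n).

-- ===== PORT A =====
-- loop state: (symbol, value, codings); `1 << bits` = ((1 <<< bits.toNat : Nat) : Int) (exact for bits ≥ 0, i.e. on Pre_)
def make_int_coding (first_symbol : Int) (first_value : Int) (bit_sizes : List Int) : List (Int × Int × Int) :=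
  (bit_sizes.foldl
    (fun (st : Int × Int × List (Int × Int × Int)) bits =>
      (st.1 + 1, st.2.1 + ((1 <<< bits.toNat : Nat) : Int), st.2.2 ++ [(st.1, st.2.1, bits)]))
    (first_symbol, first_value, [])).2.2

-- ===== PORT B =====
-- [(fs+i, fv + sum(1 << b for b in bits[:i]), bits[i]) for i in range(len(bits))]
def make_int_coding_alt (first_symbol : Int) (first_value : Int) (bit_sizes : List Int) : List (Int × Int × Int) :=
  (List.range bit_sizes.length).map (fun (i : Nat) =>
    (first_symbol + (i : Int),
     first_value + ((bit_sizes.take i).map (fun b => ((1 <<< b.toNat : Nat) : Int))).sum,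
     bit_sizes.getD i 0))

-- ===== PRECONDITION & SPEC =====
-- Pre_ excludes exactly the inputs where the Python A raises ValueError ("negative shift count"): a negative bit size.
def Pre_make_int_coding (first_symbol : Int) (first_value : Int) (bit_sizes : List Int) : Prop :=
  bit_sizes.all (fun b => decide (0 ≤ b)) = true
instance (first_symbol : Int) (first_value : Int) (bit_sizes : List Int) : Decidable (Pre_make_int_coding first_symbol first_value bit_sizes) := by unfold Pre_make_int_coding; infer_instance
def pvWitness_make_int_coding : Int × Int × List Int := (257, 3, [1, 2, 3, 4])
def Spec_make_int_coding (first_symbol : Int) (first_value : Int) (bit_sizes : List Int) (out : List (Int × Int × Int)) : Prop := out = make_int_coding_alt first_symbol first_value bit_sizes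
instance (first_symbol : Int) (first_value : Int) (bit_sizes : List Int) (out : List (Int × Int × Int)) : Decidable (Spec_make_int_coding first_symbol first_value bit_sizes out) := by unfold Spec_make_int_coding; infer_instance

-- ===== CLAIM (what is proved, stated in full; the proofs are below) =====
def Claim_equal_make_int_coding : Prop := ∀ (first_symbol : Int) (first_value : Int) (bit_sizes : List Int), Dom_make_int_coding first_symbol first_value bit_sizes → Pre_make_int_coding first_symbol first_value bit_sizes → Spec_make_int_coding first_symbol first_value bit_sizes (make_int_coding first_symbol first_value bit_sizes)

-- ===== LEMMAS AND PROOFS =====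

-- reference recursion both ports are reduced to
def micSpec (sym : Int) (v : Int) : List Int → List (Int × Int × Int)
  | [] => []
  | b :: bs => (sym, v, b) :: micSpec (sym + 1) (v + ((1 <<< b.toNat : Nat) : Int)) bs

theorem micA (bs : List Int) : ∀ (sym v : Int) (acc : List (Int × Int × Int)),
    (bs.foldl
      (fun (st : Int × Int × List (Int × Int × Int)) bits =>
        (st.1 + 1, st.2.1 + ((1 <<< bits.toNat : Nat) : Int), st.2.2 ++ [(st.1, st.2.1, bits)]))
      (sym, v, acc)).2.2 = acc ++ micSpec sym v bs := by
  induction bs with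
  | nil => intro sym v acc; simp [micSpec]
  | cons b bs ih =>
      intro sym v acc
      simp only [List.foldl_cons, micSpec]
      rw [ih]
      simp

theorem micB (bs : List Int) : ∀ (sym v : Int),
    micSpec sym v bs =
      (List.range bs.length).map (fun (i : Nat) =>
        (sym + (i : Int),
         v + ((bs.take i).map (fun b => ((1 <<< b.toNat : Nat) : Int))).sum,
         bs.getD i 0)) := by
  induction bs with
  | nil => intro sym v; simp [micSpec]
  | cons b bs ih =>
      intro sym v
      rw [micSpec, ih (sym + 1) (v + ((1 <<< b.toNat : Nat) : Int))]
      simp only [List.length_cons, List.range_succ_eq_map, List.map_cons, List.map_map]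
      refine congrArg₂ _ (by simp) ?_
      apply List.map_congr_left
      intro i _
      simp only [Function.comp, List.take_succ_cons, List.map_cons, List.sum_cons, List.getD_cons_succ]
      push_cast
      ring_nf

-- ===== VERDICT (by name: the statement is the Claim_ definition above) =====
theorem make_int_coding_spec : Claim_equal_make_int_coding := by
  intro fs fv bs _ _
  unfold Spec_make_int_coding make_int_coding make_int_coding_alt
  rw [micA bs fs fv []]
  simpa using micB bs fs fv
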